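-- pv_equiv track=rewrite | github.com/dmwhyatt/melody-features | src/melody_features/features.py | _consecutive_fifths
-- ===== SOURCE A (Python) =====
-- def _consecutive_fifths(pitch_classes: list[int]) -> list[int]:
--     """Find longest sequence of pitch classes separated by perfect fifths.
--
--     Parameters
--     ----------
--     pitch_classes : list[int]
--         List of pitch classes (0-11)
--
--     Returns
--     -------
--     list[int]
--         Longest sequence of consecutive pitch classes separated by perfect fifths
--     """
--     if not pitch_classes:
--         return []
--
--     # Circle of fifths order: C, G, D, A, E, B, F#, C#, G#, D#, A#, F
--     circle_of_fifths_order = [0, 7, 2, 9, 4, 11, 6, 1, 8, 3, 10, 5]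
--
--     longest_sequence = [pitch_classes[0]]  # Start with first pitch class
--     current_sequence = [pitch_classes[0]]
--
--     for i in range(1, len(pitch_classes)):
--         pc = pitch_classes[i]
--         last_pc = current_sequence[-1]
--
--         # Check if current PC is a fifth away from the last PC
--         if (circle_of_fifths_order.index(pc) - circle_of_fifths_order.index(last_pc)) % 12 == 1:
--             current_sequence.append(pc)
--         else:
--             # Sequence broken, check if it's the longest so far
--             if len(current_sequence) > len(longest_sequence):
--                 longest_sequence = current_sequence[:]
--             current_sequence = [pc]  # Start new sequence
--
--     # Check final sequence
--     if len(current_sequence) > len(longest_sequence):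
--         longest_sequence = current_sequence[:]
--
--     return longest_sequence
-- ===== SOURCE B (Python) =====
-- def _consecutive_fifths(pitch_classes: list[int]) -> list[int]:
--     """Segment the list into maximal runs linked by perfect fifths
--     ((pc - last) % 12 == 7), then pick the first longest run."""
--     if not pitch_classes:
--         return []
--     runs = []
--     for pc in pitch_classes:
--         if runs and (pc - runs[-1][-1]) % 12 == 7:
--             runs[-1].append(pc)
--         else:
--             runs.append([pc])
--     return max(runs, key=len)
-- ===== Notes on version B (the rewrite author's own statement) =====
-- stated objective: alternative
-- what changed: B replaces the circle-of-fifths list.index lookups with the arithmetic test (pc - last) % 12 == 7, segments the input into an explicit list of maximal fifth-linked runs in one pass, and then selects the first longest run with max(runs, key=len) instead of maintaining current_sequence/longest_sequence with incremental copies.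
-- crash fix: On lists of length >= 2 containing a pitch class outside 0..11, A raises ValueError (list.index misses the circle-of-fifths list); B returns the first longest run under the arithmetic fifth test (e.g. [0] for [0, 13]). — e.g. on _consecutive_fifths([0, 13]): A raises ValueError, B returns [0]
import Mathlib
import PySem

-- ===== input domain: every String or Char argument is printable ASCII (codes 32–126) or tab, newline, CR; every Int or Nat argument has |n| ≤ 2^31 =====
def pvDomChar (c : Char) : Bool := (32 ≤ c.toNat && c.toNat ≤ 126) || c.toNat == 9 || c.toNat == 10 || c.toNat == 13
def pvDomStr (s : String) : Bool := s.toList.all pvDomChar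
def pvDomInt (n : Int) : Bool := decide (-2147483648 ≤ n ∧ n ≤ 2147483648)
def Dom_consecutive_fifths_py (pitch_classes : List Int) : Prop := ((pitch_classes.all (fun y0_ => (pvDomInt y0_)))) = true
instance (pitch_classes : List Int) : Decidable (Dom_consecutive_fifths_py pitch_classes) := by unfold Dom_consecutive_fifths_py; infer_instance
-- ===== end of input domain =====

-- B replaces the circle-of-fifths index lookups by the arithmetic fifth test and
-- segments the input into maximal runs, then selects the first longest run (alternative decomposition).


-- ===== PORT A =====
def pvCircle : List Int := [0, 7, 2, 9, 4, 11, 6, 1, 8, 3, 10, 5]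

-- circle_of_fifths_order.index(pc); Python raises ValueError when pc is absent (none),
-- those inputs are excluded by Pre_; the .getD 0 default is never reached inside Pre_.
def pvIdxA (x : Int) : Int := ((PySem.List.index? pvCircle x).getD 0 : Nat)

-- (circle_of_fifths_order.index(pc) - circle_of_fifths_order.index(last_pc)) % 12 == 1
def pvPredA (last_pc pc : Int) : Bool := PySem.Int.mod (pvIdxA pc - pvIdxA last_pc) 12 == 1

def pvAloop (cur longest : List Int) : List Int → List Int
  | [] => if cur.length > longest.length then cur else longest
  | pc :: rest =>
      if pvPredA cur.getLast! pc then
        pvAloop (cur ++ [pc]) longest rest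
      else
        pvAloop [pc] (if cur.length > longest.length then cur else longest) rest

def consecutive_fifths_py (pitch_classes : List Int) : List Int :=
  match pitch_classes with
  | [] => []
  | pc0 :: rest => pvAloop [pc0] [pc0] rest

-- ===== PORT B =====
-- (pc - runs[-1][-1]) % 12 == 7
def pvPredB (last_pc pc : Int) : Bool := PySem.Int.mod (pc - last_pc) 12 == 7

-- loop body: extend the last run or start a new one
def pvBstep (runs : List (List Int)) (pc : Int) : List (List Int) :=
  match runs.getLast? with
  | some r => if pvPredB r.getLast! pc then runs.dropLast ++ [r ++ [pc]] else runs ++ [[pc]]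
  | none => runs ++ [[pc]]

def consecutive_fifths_py_alt (pitch_classes : List Int) : List Int :=
  match pitch_classes with
  | [] => []
  | _ :: _ =>
      (PySem.List.max? (pitch_classes.foldl pvBstep []) (fun r => r.length)).getD []

-- ===== PRECONDITION & SPEC =====
-- Pre_ excludes exactly the inputs on which A raises ValueError: lists of length ≥ 2
-- containing a pitch class outside 0..11 (list.index on the circle-of-fifths list fails).
def Pre_consecutive_fifths_py (pitch_classes : List Int) : Prop :=
  pitch_classes.length ≤ 1 ∨ ∀ x ∈ pitch_classes, 0 ≤ x ∧ x ≤ 11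

instance (pitch_classes : List Int) : Decidable (Pre_consecutive_fifths_py pitch_classes) := by
  unfold Pre_consecutive_fifths_py; infer_instance

def pvWitness_consecutive_fifths_py : List Int := [0, 7, 2, 5]

-- On lists of length ≥ 2 containing a pitch class outside 0..11, A raises ValueError
-- (list.index misses), while B returns the first longest run under the arithmetic fifth test.
def Raises_consecutive_fifths_py (pitch_classes : List Int) : Prop :=
  2 ≤ pitch_classes.length ∧ ∃ x ∈ pitch_classes, ¬(0 ≤ x ∧ x ≤ 11)

instance (pitch_classes : List Int) : Decidable (Raises_consecutive_fifths_py pitch_classes) := by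
  unfold Raises_consecutive_fifths_py; infer_instance

def pvRaiseWitness_consecutive_fifths_py : List Int := [0, 13]
def pvRaiseWitnessOut_consecutive_fifths_py : List Int := [0]

def Spec_consecutive_fifths_py (pitch_classes : List Int) (out : List Int) : Prop :=
  out = consecutive_fifths_py_alt pitch_classes
instance (pitch_classes : List Int) (out : List Int) : Decidable (Spec_consecutive_fifths_py pitch_classes out) := by
  unfold Spec_consecutive_fifths_py; infer_instance

-- ===== CLAIM (what is proved, stated in full; the proofs are below) =====
def Claim_equal_consecutive_fifths_py : Prop := ∀ (pitch_classes : List Int), Dom_consecutive_fifths_py pitch_classes → Pre_consecutive_fifths_py pitch_classes → Spec_consecutive_fifths_py pitch_classes (consecutive_fifths_py pitch_classes)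

def Claim_raises_consecutive_fifths_py : Prop := (∀ (pitch_classes : List Int), Dom_consecutive_fifths_py pitch_classes → Raises_consecutive_fifths_py pitch_classes → ¬ Pre_consecutive_fifths_py pitch_classes) ∧ (Dom_consecutive_fifths_py (pvRaiseWitness_consecutive_fifths_py) ∧ Raises_consecutive_fifths_py (pvRaiseWitness_consecutive_fifths_py) ∧ consecutive_fifths_py_alt (pvRaiseWitness_consecutive_fifths_py) = pvRaiseWitnessOut_consecutive_fifths_py)


-- ===== LEMMAS AND PROOFS =====

lemma pvGetLast_bang (l : List Int) : l.getLast! = l.getLast?.getD 0 := by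
  cases l with
  | nil => rfl
  | cons a as => simp [List.getLast!, List.getLast?_eq_some_getLast]

-- maximal-run segmentation, parametrised by the linking predicate
def pvSeg (p : Int → Int → Bool) (cur : List Int) : List Int → List (List Int)
  | [] => [cur]
  | pc :: rest => if p cur.getLast! pc then pvSeg p (cur ++ [pc]) rest else cur :: pvSeg p [pc] rest

def pvChoose (b r : List Int) : List Int := if r.length > b.length then r else b

lemma pvAloop_eq_foldl (rest : List Int) : ∀ cur longest,
    pvAloop cur longest rest = List.foldl pvChoose longest (pvSeg pvPredA cur rest) := by
  induction rest with
  | nil => intro cur longest; simp [pvAloop, pvSeg, pvChoose]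
  | cons pc rest ih =>
      intro cur longest
      by_cases h : pvPredA (cur.getLast?.getD 0) pc = true
      · simp [pvAloop, pvSeg, h, ih]
      · simp only [Bool.not_eq_true] at h
        simp [pvAloop, pvSeg, h, ih, pvChoose]

lemma pred_agree (x y : Int) (hx : 0 ≤ x ∧ x ≤ 11) (hy : 0 ≤ y ∧ y ≤ 11) :
    pvPredA x y = pvPredB x y := by
  obtain ⟨hx0, hx1⟩ := hx
  obtain ⟨hy0, hy1⟩ := hy
  interval_cases x <;> interval_cases y <;> decide

lemma pvSeg_congr (rest : List Int) : ∀ cur,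
    (0 ≤ cur.getLast?.getD 0 ∧ cur.getLast?.getD 0 ≤ 11) → (∀ x ∈ rest, 0 ≤ x ∧ x ≤ 11) →
    pvSeg pvPredA cur rest = pvSeg pvPredB cur rest := by
  induction rest with
  | nil => intro cur _ _; rfl
  | cons pc rest ih =>
      intro cur hcur hall
      have hpc : 0 ≤ pc ∧ pc ≤ 11 := hall pc (by simp)
      have hrest : ∀ x ∈ rest, 0 ≤ x ∧ x ≤ 11 := fun x hx => hall x (by simp [hx])
      have hp := pred_agree (cur.getLast?.getD 0) pc hcur hpc
      have hl : cur.getLast! = cur.getLast?.getD 0 := pvGetLast_bang cur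
      by_cases h : pvPredB (cur.getLast?.getD 0) pc = true
      · have hA : pvPredA (cur.getLast?.getD 0) pc = true := by rw [hp]; exact h
        rw [pvSeg, pvSeg, hl, hA, h, if_pos rfl, if_pos rfl,
          ih (cur ++ [pc]) (by simpa using hpc) hrest]
      · simp only [Bool.not_eq_true] at h
        have hA : pvPredA (cur.getLast?.getD 0) pc = false := by rw [hp]; exact h
        rw [pvSeg, pvSeg, hl, hA, h]
        simp only [Bool.false_eq_true, if_false]
        rw [ih [pc] (by simpa using hpc) hrest]

lemma foldl_pvBstep (rest : List Int) : ∀ done cur, cur ≠ [] →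
    List.foldl pvBstep (done ++ [cur]) rest = done ++ pvSeg pvPredB cur rest := by
  induction rest with
  | nil => intro done cur _; simp [pvSeg]
  | cons pc rest ih =>
      intro done cur hne
      have hlast : (done ++ [cur]).getLast? = some cur := by simp
      have hl : cur.getLast! = cur.getLast?.getD 0 := pvGetLast_bang cur
      by_cases h : pvPredB (cur.getLast?.getD 0) pc = true
      · have hstep : pvBstep (done ++ [cur]) pc = done ++ [cur ++ [pc]] := by
          simp [pvBstep, hlast, h]
        rw [List.foldl_cons, hstep, ih done (cur ++ [pc]) (by simp)]
        rw [pvSeg, hl, if_pos h]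
      · simp only [Bool.not_eq_true] at h
        have hstep : pvBstep (done ++ [cur]) pc = (done ++ [cur]) ++ [[pc]] := by
          simp [pvBstep, hlast, h]
        rw [List.foldl_cons, hstep, pvSeg, hl, h]
        simp only [Bool.false_eq_true, if_false]
        have := ih (done ++ [cur]) [pc] (by simp)
        simpa using this

lemma pvSeg_head (p : Int → Int → Bool) (rest : List Int) : ∀ cur,
    ∃ u rs, pvSeg p cur rest = (cur ++ u) :: rs := by
  induction rest with
  | nil => intro cur; exact ⟨[], [], by simp [pvSeg]⟩
  | cons pc rest ih =>
      intro cur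
      by_cases h : p cur.getLast! pc = true
      · obtain ⟨u, rs, hu⟩ := ih (cur ++ [pc])
        exact ⟨pc :: u, rs, by rw [pvSeg, if_pos h, hu]; simp⟩
      · simp only [Bool.not_eq_true] at h
        refine ⟨[], pvSeg p [pc] rest, ?_⟩
        rw [pvSeg, h]
        simp
lemma max?_foldl_some {α : Type} (key : α → Nat) (xs : List α) : ∀ (a : α),
    List.foldl (fun acc x => match acc with
      | none => some x
      | some m => if key m < key x then some x else some m) (some a) xs
      = some (List.foldl (fun m x => if key m < key x then x else m) a xs) := by
  induction xs with
  | nil => intro a; rfl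
  | cons x xs ih =>
      intro a
      by_cases h : key a < key x <;> simp [List.foldl_cons, h, ih]

lemma choose_step (m x : List Int) :
    pvChoose m x = if m.length < x.length then x else m := by
  simp [pvChoose, gt_iff_lt]

lemma choose_singleton (h : Int) (u : List Int) : pvChoose [h] (h :: u) = h :: u := by
  cases u with
  | nil => simp [pvChoose]
  | cons a u => simp [pvChoose]

lemma pvMain (h : Int) (rest : List Int)
    (hrange : ∀ x ∈ h :: rest, 0 ≤ x ∧ x ≤ 11) :
    consecutive_fifths_py (h :: rest) = consecutive_fifths_py_alt (h :: rest) := by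
  have hA : consecutive_fifths_py (h :: rest)
      = List.foldl pvChoose [h] (pvSeg pvPredA [h] rest) := by
    simp [consecutive_fifths_py, pvAloop_eq_foldl]
  have hseg : pvSeg pvPredA [h] rest = pvSeg pvPredB [h] rest :=
    pvSeg_congr rest [h] (by simpa using hrange h (by simp))
      (fun x hx => hrange x (by simp [hx]))
  obtain ⟨u, rs, hu⟩ := pvSeg_head pvPredB rest [h]
  have hfold : List.foldl pvBstep [] (h :: rest) = pvSeg pvPredB [h] rest := by
    rw [List.foldl_cons]
    have hstep : pvBstep [] h = [] ++ [[h]] := rfl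
    rw [hstep, foldl_pvBstep rest [] [h] (by simp)]
    rfl
  have hB : consecutive_fifths_py_alt (h :: rest)
      = (PySem.List.max? (pvSeg pvPredB [h] rest) (fun r => r.length)).getD [] := by
    rw [consecutive_fifths_py_alt, hfold]
  rw [hA, hseg, hu, hB, hu]
  have hcons : ([h] ++ u) = h :: u := by simp
  rw [hcons, List.foldl_cons, choose_singleton]
  have hmax : PySem.List.max? ((h :: u) :: rs) (fun r : List Int => r.length)
      = some (List.foldl (fun m x => if m.length < x.length then x else m) (h :: u) rs) := by
    rw [PySem.List.max?, List.foldl_cons]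
    exact max?_foldl_some (fun r : List Int => r.length) rs (h :: u)
  rw [hmax]
  have hfun : pvChoose = fun m x : List Int => if m.length < x.length then x else m := by
    funext m x; exact choose_step m x
  rw [hfun]
  rfl

-- ===== VERDICT (by name: the statement is the Claim_ definition above) =====
theorem consecutive_fifths_py_spec : Claim_equal_consecutive_fifths_py := by
  intro pcs _ hpre
  unfold Spec_consecutive_fifths_py
  match pcs with
  | [] => rfl
  | [h] => rfl
  | h :: h2 :: rest =>
    have hrange : ∀ x ∈ h :: h2 :: rest, 0 ≤ x ∧ x ≤ 11 := by
      rcases hpre with hlen | hr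
      · simp at hlen
      · exact hr
    exact pvMain h (h2 :: rest) hrange

theorem consecutive_fifths_py_raises : Claim_raises_consecutive_fifths_py := by
  unfold Claim_raises_consecutive_fifths_py
  constructor
  · intro pcs _ ⟨hlen, x, hx, hbad⟩ hpre
    rcases hpre with h1 | hall
    · omega
    · exact hbad (hall x hx)
  · decide

-- sanity check: the equivalence witness lies inside Pre_ and outside the raises region
lemma pvWitness_not_raises :
    ¬ Raises_consecutive_fifths_py pvWitness_consecutive_fifths_py :=
  fun hr => consecutive_fifths_py_raises.1 pvWitness_consecutive_fifths_py (by decide) hr (by decide)
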